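-- pv_equiv track=rewrite | github.com/aidanematzadeh/eval-word-rep | wikicorpus.py | remove_template
-- ===== SOURCE A (Python) =====
-- def remove_template(s):
--     """Remove template wikimedia markup.
--
--     Return a copy of `s` with all the wikimedia markup template removed. See
--     http://meta.wikimedia.org/wiki/Help:Template for wikimedia templates
--     details.
--
--     Note: Since template can be nested, it is difficult remove them using
--     regular expresssions.
--     """
--
--     # Find the start and end position of each template by finding the opening
--     # '{{' and closing '}}'
--     n_open, n_close = 0, 0
--     starts, ends = [], []
--     in_template = False
--     prev_c = None
--     for i, c in enumerate(iter(s)):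
--         if not in_template:
--             if c == '{' and c == prev_c:
--                 starts.append(i - 1)
--                 in_template = True
--                 n_open = 1
--         if in_template:
--             if c == '{':
--                 n_open += 1
--             elif c == '}':
--                 n_close += 1
--             if n_open == n_close:
--                 ends.append(i)
--                 in_template = False
--                 n_open, n_close = 0, 0
--         prev_c = c
--
--     # Remove all the templates
--     s = ''.join([s[end + 1:start] for start, end in
--                  zip(starts + [None], [-1] + ends)])
--
--     return s
-- ===== SOURCE B (Python) =====
-- def remove_template(s):
--     """Remove template wikimedia markup (streaming single pass).
--
--     Keeps a single brace-balance counter; while outside templates characters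
--     go straight to an output buffer, and on seeing the second '{' of an
--     opening '{{' the already-emitted first '{' is popped.  Text after an
--     unclosed template is never emitted.
--     """
--     out = []
--     depth = 0
--     prev = None
--     for c in s:
--         if depth == 0:
--             if c == '{' and prev == '{':
--                 out.pop()
--                 depth = 2
--             else:
--                 out.append(c)
--         elif c == '{':
--             depth += 1
--         elif c == '}':
--             depth -= 1
--         prev = c
--     return ''.join(out)
-- ===== Notes on version B (the rewrite author's own statement) =====
-- stated objective: simpler
-- what changed: A scans once recording template start/end index lists and then rebuilds the string by slicing and joining the gaps; B is a single streaming pass with one brace-balance counter that appends kept characters directly to an output buffer (popping the already-emitted first '{' when a template opens), with no index lists, no slicing and no join phase.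
import Mathlib
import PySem

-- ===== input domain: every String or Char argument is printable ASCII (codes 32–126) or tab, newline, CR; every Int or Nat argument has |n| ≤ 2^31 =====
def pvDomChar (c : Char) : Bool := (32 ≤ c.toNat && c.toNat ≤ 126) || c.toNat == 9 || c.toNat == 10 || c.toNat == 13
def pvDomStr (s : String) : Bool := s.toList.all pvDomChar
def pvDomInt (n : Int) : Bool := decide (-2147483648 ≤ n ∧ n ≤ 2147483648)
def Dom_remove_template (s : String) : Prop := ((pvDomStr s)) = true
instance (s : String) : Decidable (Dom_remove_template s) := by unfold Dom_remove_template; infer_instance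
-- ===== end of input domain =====

-- B rewrites A's two-phase scan (collect template start/end indices, then join slices) as a
-- single streaming pass that appends kept characters directly to an output buffer (objective: simpler).

structure PvStA where
  nOpen : Int
  nClose : Int
  starts : List Int
  ends : List Int
  inT : Bool
  prev : Option Char
deriving Repr, DecidableEq

def pvStepA (st : PvStA) (ic : Int × Char) : PvStA :=
  -- body of A's `for i, c in enumerate(iter(s))` loop
  let i := ic.1
  let c := ic.2
  let st :=
    if st.inT = false ∧ c = '{' ∧ st.prev = some c then
      { st with starts := st.starts ++ [i - 1], inT := true, nOpen := 1 }
    else st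
  let st :=
    if st.inT then
      let st :=
        if c = '{' then { st with nOpen := st.nOpen + 1 }
        else if c = '}' then { st with nClose := st.nClose + 1 }
        else st
      if st.nOpen = st.nClose then
        { st with ends := st.ends ++ [i], inT := false, nOpen := 0, nClose := 0 }
      else st
    else st
  { st with prev := some c }

def remove_template (s : String) : String :=
  let st := (PySem.List.enumerate s.toList 0).foldl pvStepA ⟨0, 0, [], [], false, none⟩
  -- ''.join([s[end + 1:start] for start, end in zip(starts + [None], [-1] + ends)])
  String.ofList (PySem.Chars.join []
    ((List.zip (st.starts.map some ++ [none]) ((-1 : Int) :: st.ends)).map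
      (fun p => PySem.List.slice s.toList (some (p.2 + 1)) p.1)))

-- ===== PORT B =====
def pvStepB (st : List Char × Int × Option Char) (c : Char) : List Char × Int × Option Char :=
  -- body of B's `for c in s` loop; state (out, depth, prev); out.pop() is dropLast
  let out := st.1
  let depth := st.2.1
  let prev := st.2.2
  let od :=
    if depth = 0 then
      if c = '{' ∧ prev = some '{' then (out.dropLast, (2 : Int)) else (out ++ [c], depth)
    else if c = '{' then (out, depth + 1)
    else if c = '}' then (out, depth - 1)
    else (out, depth)
  (od.1, od.2, some c)

def remove_template_alt (s : String) : String :=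
  String.ofList (s.toList.foldl pvStepB ([], 0, none)).1

-- ===== PRECONDITION & SPEC =====
def Spec_remove_template (s : String) (out : String) : Prop := out = remove_template_alt s
instance (s : String) (out : String) : Decidable (Spec_remove_template s out) := by unfold Spec_remove_template; infer_instance

-- ===== CLAIM (what is proved, stated in full; the proofs are below) =====
def Claim_equal_remove_template : Prop := ∀ (s : String), Dom_remove_template s → Spec_remove_template s (remove_template s)

-- ===== LEMMAS AND PROOFS =====

-- `''.join` with empty separator is flatten
theorem pvJoin_nil_sep (l : List (List Char)) : PySem.Chars.join [] l = l.flatten := by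
  induction l with
  | nil => rfl
  | cons a t ih =>
    cases t with
    | nil => simp [PySem.Chars.join_singleton]
    | cons b r => rw [PySem.Chars.join_cons_cons]; simp_all

-- zip truncates away a right tail
theorem pvZip_trunc {α β : Type} (xs : List α) (ys zs : List β) (h : xs.length ≤ ys.length) :
    xs.zip (ys ++ zs) = xs.zip ys := by
  induction xs generalizing ys with
  | nil => simp
  | cons x xs ih =>
    cases ys with
    | nil => simp at h
    | cons y ys => simp_all [List.zip_cons_cons]

theorem pvZip_trunc_left {α β : Type} (xs zs : List α) (ys : List β) (h : ys.length ≤ xs.length) :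
    (xs ++ zs).zip ys = xs.zip ys := by
  induction xs generalizing ys with
  | nil => cases ys with
    | nil => simp
    | cons y ys => simp at h
  | cons x xs ih =>
    cases ys with
    | nil => simp
    | cons y ys => simp_all [List.zip_cons_cons]

theorem pvZip_snoc_left {α β : Type} (xs : List α) (ys : List β) (x : α)
    (h : ys.length = xs.length + 1) (hne : ys ≠ []) :
    (xs ++ [x]).zip ys = xs.zip ys ++ [(x, ys.getLast hne)] := by
  have h2 : xs.zip ys = xs.zip ys.dropLast := by
    conv_lhs => rw [← List.dropLast_concat_getLast hne]
    exact pvZip_trunc xs ys.dropLast [ys.getLast hne] (by simp [List.length_dropLast, h])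
  rw [h2]
  conv_lhs => rw [← List.dropLast_concat_getLast hne]
  rw [List.zip_append (by simp [List.length_dropLast, h])]
  rfl

-- the completed segments of A's final join, as a list of chars
def pvDone (s : List Char) (starts ends : List Int) : List Char :=
  (((starts.zip ((-1 : Int) :: ends)).map
      (fun p => PySem.List.slice s (some (p.2 + 1)) (some p.1)))).flatten

def pvLastE (ends : List Int) : Int := ((-1 : Int) :: ends).getLast (by simp)

theorem pvLastE_snoc (ends : List Int) (x : Int) : pvLastE (ends ++ [x]) = x := by
  simp [pvLastE]

theorem pvDone_close (s : List Char) (starts ends : List Int) (x : Int)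
    (h : starts.length ≤ ends.length + 1) :
    pvDone s starts (ends ++ [x]) = pvDone s starts ends := by
  unfold pvDone
  rw [show (-1 : Int) :: (ends ++ [x]) = ((-1 : Int) :: ends) ++ [x] by rfl]
  rw [pvZip_trunc starts _ [x] (by simpa using h)]

theorem pvDone_enter (s : List Char) (starts ends : List Int) (x : Int)
    (h : starts.length = ends.length) :
    pvDone s (starts ++ [x]) ends
      = pvDone s starts ends ++ PySem.List.slice s (some (pvLastE ends + 1)) (some x) := by
  unfold pvDone
  rw [pvZip_snoc_left starts ((-1 : Int) :: ends) x (by simp [h]) (by simp)]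
  simp [pvLastE]

-- A's final join, from a final state
def pvFinish (s : List Char) (st : PvStA) : List Char :=
  PySem.Chars.join []
    ((List.zip (st.starts.map some ++ [none]) ((-1 : Int) :: st.ends)).map
      (fun p => PySem.List.slice s (some (p.2 + 1)) p.1))

theorem pvZip_map_left {α β γ : Type} (xs : List α) (ys : List β) (f : α → γ) :
    (xs.map f).zip ys = (xs.zip ys).map (fun p => (f p.1, p.2)) := by
  induction xs generalizing ys with
  | nil => simp
  | cons x xs ih => cases ys <;> simp_all [List.zip_cons_cons]

theorem pvFinish_inT (s : List Char) (st : PvStA)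
    (h : st.starts.length = st.ends.length + 1) :
    pvFinish s st = pvDone s st.starts st.ends := by
  unfold pvFinish pvDone
  rw [pvJoin_nil_sep,
      pvZip_trunc_left (st.starts.map some) [none] ((-1 : Int) :: st.ends) (by simp [h]),
      pvZip_map_left]
  simp [Function.comp_def]

theorem pvFinish_out (s : List Char) (st : PvStA)
    (h : st.starts.length = st.ends.length) :
    pvFinish s st
      = pvDone s st.starts st.ends ++ PySem.List.slice s (some (pvLastE st.ends + 1)) none := by
  unfold pvFinish pvDone
  rw [pvJoin_nil_sep]
  have hne : ((-1 : Int) :: st.ends) ≠ [] := by simp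
  rw [pvZip_snoc_left (st.starts.map some) ((-1 : Int) :: st.ends) none (by simp [h]) hne]
  rw [pvZip_map_left]
  simp [pvLastE, Function.comp_def]

-- the loop invariant tying A's state to B's state after i characters of s
def pvInv (s : List Char) (i : Nat) (stA : PvStA) (stB : List Char × Int × Option Char) : Prop :=
  stA.prev = stB.2.2 ∧
  (∀ c, stB.2.2 = some c → 0 < i ∧ s[i - 1]? = some c) ∧
  (if stA.inT then
      stB.2.1 = stA.nOpen - stA.nClose ∧ stA.nClose < stA.nOpen ∧
      stA.starts.length = stA.ends.length + 1 ∧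
      stB.1 = pvDone s stA.starts stA.ends
    else
      stA.nOpen = 0 ∧ stA.nClose = 0 ∧ stB.2.1 = 0 ∧
      stA.starts.length = stA.ends.length ∧
      ∃ e1 : Nat, e1 ≤ i ∧ pvLastE stA.ends = (e1 : Int) - 1 ∧
        (e1 = 0 ∨ s[e1 - 1]? = some '}') ∧
        stB.1 = pvDone s stA.starts stA.ends ++ (s.drop e1).take (i - e1))


-- (l.take (n+1)).dropLast = l.take n when in range
theorem pvTake_dropLast (l : List Char) (n : Nat) (h : n + 1 ≤ l.length) :
    (l.take (n + 1)).dropLast = l.take n := by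
  rw [List.dropLast_eq_take, List.take_take, List.length_take]; congr 1; omega

-- one loop step preserves the invariant
theorem pv_step (s : List Char) (i : Nat) (stA : PvStA) (stB : List Char × Int × Option Char)
    (c : Char) (hinv : pvInv s i stA stB) (hc : s[i]? = some c) :
    pvInv s (i + 1) (pvStepA stA ((i : Int), c)) (pvStepB stB c) := by
  obtain ⟨no, nc, ss, es, it, pv⟩ := stA
  obtain ⟨out, dp, pb⟩ := stB
  obtain ⟨hprev, hprevc, hrest⟩ := hinv
  simp only at hprev hprevc
  have hilen : i < s.length := by
    obtain ⟨h, -⟩ := List.getElem?_eq_some_iff.mp hc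
    exact h
  have hpc : ∀ d : Char, (some c : Option Char) = some d → 0 < i + 1 ∧ s[i + 1 - 1]? = some d := by
    intro d hd
    cases hd
    exact ⟨Nat.succ_pos _, by simpa using hc⟩
  cases it with
  | true =>
    rw [if_pos rfl] at hrest
    obtain ⟨hd, hlt, hlen, hout⟩ := hrest
    simp only at hd hlt hlen hout
    have hdp : ¬ dp = 0 := by omega
    by_cases hc1 : c = '{'
    · subst hc1
      have hne1 : ¬ (no + 1 = nc) := by omega
      have hA : pvStepA ⟨no, nc, ss, es, true, pv⟩ ((i : Int), '{')
          = ⟨no + 1, nc, ss, es, true, some '{'⟩ := by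
        simp [pvStepA, hne1]
      have hB : pvStepB (out, dp, pb) '{' = (out, dp + 1, some '{') := by
        simp [pvStepB, hdp]
      rw [hA, hB]
      refine ⟨rfl, hpc, ?_⟩
      rw [if_pos rfl]
      exact ⟨by show dp + 1 = no + 1 - nc; omega, by show nc < no + 1; omega, hlen, hout⟩
    · by_cases hc2 : c = '}'
      · subst hc2
        by_cases heq : no = nc + 1
        · -- the template closes here
          have hA : pvStepA ⟨no, nc, ss, es, true, pv⟩ ((i : Int), '}')
              = ⟨0, 0, ss, es ++ [(i : Int)], false, some '}'⟩ := by
            simp [pvStepA, heq]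
          have hB : pvStepB (out, dp, pb) '}' = (out, dp - 1, some '}') := by
            simp [pvStepB, hdp]
          rw [hA, hB]
          refine ⟨rfl, hpc, ?_⟩
          rw [if_neg (by simp)]
          refine ⟨rfl, rfl, by show dp - 1 = 0; omega, by simp [hlen], i + 1, le_refl _, ?_, ?_, ?_⟩
          · show pvLastE (es ++ [(i : Int)]) = ((i + 1 : Nat) : Int) - 1
            rw [pvLastE_snoc]
            push_cast
            ring
          · right
            simpa using hc
          · show out = pvDone s ss (es ++ [(i : Int)]) ++ (s.drop (i + 1)).take (i + 1 - (i + 1))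
            rw [pvDone_close s ss es _ (le_of_eq hlen), ← hout]
            simp
        · -- still open
          have hA : pvStepA ⟨no, nc, ss, es, true, pv⟩ ((i : Int), '}')
              = ⟨no, nc + 1, ss, es, true, some '}'⟩ := by
            simp [pvStepA, show ¬(no = nc + 1) from heq]
          have hB : pvStepB (out, dp, pb) '}' = (out, dp - 1, some '}') := by
            simp [pvStepB, hdp]
          rw [hA, hB]
          refine ⟨rfl, hpc, ?_⟩
          rw [if_pos rfl]
          exact ⟨by show dp - 1 = no - (nc + 1); omega, by show nc + 1 < no; omega, hlen, hout⟩
      · -- a character that is neither brace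
        have hne0 : ¬ (no = nc) := by omega
        have hA : pvStepA ⟨no, nc, ss, es, true, pv⟩ ((i : Int), c)
            = ⟨no, nc, ss, es, true, some c⟩ := by
          simp [pvStepA, hc1, hc2, hne0]
        have hB : pvStepB (out, dp, pb) c = (out, dp, some c) := by
          simp [pvStepB, hdp, hc1, hc2]
        rw [hA, hB]
        exact ⟨rfl, hpc, by rw [if_pos rfl]; exact ⟨hd, hlt, hlen, hout⟩⟩
  | false =>
    rw [if_neg (by simp)] at hrest
    obtain ⟨hno, hnc, hd0, hlen, e1, he1i, hlast, hch, hout⟩ := hrest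
    simp only at hno hnc hd0 hlen hlast hch hout
    subst hno hnc hd0
    by_cases hEnt : c = '{' ∧ pv = some c
    · -- a template opens: '{' after an emitted '{'
      obtain ⟨hc1, hpv⟩ := hEnt
      subst hc1
      have hpb : pb = some '{' := by rw [← hprev]; exact hpv
      obtain ⟨hipos, hci1⟩ := hprevc '{' hpb
      have he1lt : e1 < i := by
        rcases hch with h0 | hss
        · omega
        · by_contra hge
          have he1e : e1 = i := by omega
          subst he1e
          rw [hci1] at hss
          simp at hss
      have hA : pvStepA ⟨0, 0, ss, es, false, pv⟩ ((i : Int), '{')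
          = ⟨2, 0, ss ++ [(i : Int) - 1], es, true, some '{'⟩ := by
        simp [pvStepA, hpv]
      have hB : pvStepB (out, 0, pb) '{' = (out.dropLast, 2, some '{') := by
        simp [pvStepB, hpb]
      rw [hA, hB]
      refine ⟨rfl, hpc, ?_⟩
      rw [if_pos rfl]
      refine ⟨by norm_num, by norm_num, by simp [hlen], ?_⟩
      have hcast : ((i : Int) - 1) = ((i - 1 : Nat) : Int) := by omega
      have hEe : (pvLastE es + 1) = ((e1 : Nat) : Int) := by rw [hlast]; ring
      show out.dropLast = pvDone s (ss ++ [(i : Int) - 1]) es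
      rw [pvDone_enter s ss es _ hlen, hEe, hcast, PySem.List.slice_natCast]
      rw [hout, List.dropLast_append_of_ne_nil]
      · have h1 : i - e1 = (i - e1 - 1) + 1 := by omega
        rw [h1, pvTake_dropLast ((s.drop e1)) (i - e1 - 1) (by simp; omega)]
        congr 2
        omega
      · have hlth : ((s.drop e1).take (i - e1)).length = i - e1 := by simp; omega
        intro hnil
        rw [hnil] at hlth
        simp at hlth
        omega
    · -- plain outside character, emitted
      have hBcond : ¬ (c = '{' ∧ pb = some '{') := by
        rintro ⟨h1, h2⟩
        exact hEnt ⟨h1, by rw [hprev, h2, h1]⟩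
      have hA : pvStepA ⟨0, 0, ss, es, false, pv⟩ ((i : Int), c)
          = ⟨0, 0, ss, es, false, some c⟩ := by
        simp [pvStepA, hEnt]
      have hB : pvStepB (out, 0, pb) c = (out ++ [c], 0, some c) := by
        simp [pvStepB, hBcond]
      rw [hA, hB]
      refine ⟨rfl, hpc, ?_⟩
      rw [if_neg (by simp)]
      refine ⟨rfl, rfl, rfl, hlen, e1, by omega, hlast, hch, ?_⟩
      show out ++ [c] = pvDone s ss es ++ (s.drop e1).take (i + 1 - e1)
      rw [hout]
      have h1 : i + 1 - e1 = (i - e1) + 1 := by omega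
      rw [h1, List.take_add_one]
      have h2 : (s.drop e1)[i - e1]? = s[i]? := by
        rw [List.getElem?_drop]
        congr 1
        omega
      rw [h2, hc]
      simp

-- the invariant carries A's pending join to B's buffer across the whole tail
theorem pv_main (s : List Char) (cs : List Char) (i : Nat) (stA : PvStA)
    (stB : List Char × Int × Option Char)
    (hinv : pvInv s i stA stB) (hdrop : cs = s.drop i) :
    pvFinish s ((PySem.List.enumerate cs (i : Int)).foldl pvStepA stA)
      = (cs.foldl pvStepB stB).1 := by
  induction cs generalizing i stA stB with
  | nil =>
    obtain ⟨hprev, hprevc, hrest⟩ := hinv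
    have hsl : s.length ≤ i := by
      have hl := congrArg List.length hdrop
      simp at hl
      omega
    simp only [PySem.List.enumerate_nil, List.foldl_nil]
    by_cases hT : stA.inT = true
    · rw [if_pos hT] at hrest
      obtain ⟨-, -, hl, hout⟩ := hrest
      rw [pvFinish_inT s _ hl, ← hout]
    · rw [if_neg hT] at hrest
      obtain ⟨-, -, -, hl, e1, he1i, hlast, -, hout⟩ := hrest
      rw [pvFinish_out s _ hl, hout]
      have hEe : (pvLastE stA.ends + 1) = ((e1 : Nat) : Int) := by rw [hlast]; ring
      rw [hEe, PySem.List.slice_from_natCast]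
      congr 1
      rw [List.take_of_length_le (by simp; omega)]
  | cons c cs ih =>
    have hci : s[i]? = some c := by
      have h0 : (s.drop i)[0]? = s[i + 0]? := List.getElem?_drop
      rw [← hdrop] at h0
      simpa using h0.symm
    have hdrop' : cs = s.drop (i + 1) := by
      have hdd : s.drop (i + 1) = (s.drop i).drop 1 := by
        rw [List.drop_drop]
      rw [hdd, ← hdrop]
      simp
    rw [PySem.List.enumerate_cons, List.foldl_cons, List.foldl_cons]
    have hstep := pv_step s i stA stB c hinv hci
    have hcast : ((i : Int) + 1) = ((i + 1 : Nat) : Int) := by push_cast; ring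
    rw [hcast]
    exact ih (i + 1) _ _ hstep hdrop'

-- ===== VERDICT (by name: the statement is the Claim_ definition above) =====
theorem remove_template_spec : Claim_equal_remove_template := by
  intro s _
  unfold Spec_remove_template remove_template remove_template_alt
  have hinv : pvInv s.toList 0 ⟨0, 0, [], [], false, none⟩ ([], 0, none) := by
    refine ⟨rfl, by intro c hcc; simp at hcc, ?_⟩
    rw [if_neg (by simp)]
    exact ⟨rfl, rfl, rfl, rfl, 0, le_refl 0, by norm_num [pvLastE], Or.inl rfl, by simp [pvDone]⟩
  have h := pv_main s.toList s.toList 0 ⟨0, 0, [], [], false, none⟩ ([], 0, none) hinv (by simp)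
  unfold pvFinish at h
  exact congrArg String.ofList h
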